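-- pv_equiv track=rewrite | github.com/sberdevices/smart_app_framework | smart_kit/text_preprocessing/nltk_tokenizer_binding.py | _merge_hashtags
-- ===== SOURCE A (Python) =====
-- def _merge_hashtags(tokens):
--     '''
--     слепляем токен '#' с идущим за ним
--     :param tokens: list of strings
--     :return: list of strings
--     '''
--     merged_tokens = []
--     i = 0
--     while i < len(tokens):
--         if tokens[i] == '#' and i + 1 < len(tokens):
--             merged_tokens.append(tokens[i] + tokens[i + 1])
--             i += 2
--         else:
--             merged_tokens.append(tokens[i])
--             i += 1
--
--     return merged_tokens
-- ===== SOURCE B (Python) =====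
-- def _merge_hashtags(tokens):
--     '''
--     слепляем токен '#' с идущим за ним
--     :param tokens: list of strings
--     :return: list of strings
--     '''
--     merged_tokens = []
--     pending = False
--     for token in tokens:
--         if pending:
--             merged_tokens.append('#' + token)
--             pending = False
--         elif token == '#':
--             pending = True
--         else:
--             merged_tokens.append(token)
--     if pending:
--         merged_tokens.append('#')
--     return merged_tokens
-- ===== Notes on version B (the rewrite author's own statement) =====
-- stated objective: simpler
-- what changed: Replaced the index-based while loop with look-ahead and i+=2 stepping by a direct carry-state pass over the tokens with a pending-hash flag (lone trailing '#' flushed after the loop).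
import Mathlib
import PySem

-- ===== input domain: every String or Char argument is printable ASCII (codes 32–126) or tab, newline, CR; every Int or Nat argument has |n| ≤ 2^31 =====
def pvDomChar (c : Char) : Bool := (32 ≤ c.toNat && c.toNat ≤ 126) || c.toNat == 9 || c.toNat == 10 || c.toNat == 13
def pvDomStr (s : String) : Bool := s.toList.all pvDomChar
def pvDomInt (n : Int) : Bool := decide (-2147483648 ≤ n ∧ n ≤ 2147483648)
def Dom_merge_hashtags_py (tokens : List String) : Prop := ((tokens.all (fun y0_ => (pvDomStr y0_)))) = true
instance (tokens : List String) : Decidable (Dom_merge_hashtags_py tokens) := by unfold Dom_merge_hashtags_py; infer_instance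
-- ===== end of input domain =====

-- B replaces the index/look-ahead while loop by a carry-state pass with a pending-'#' flag; same values, same O(n) cost.
-- ===== PORT A =====
-- while i < len(tokens): look at tokens[i] (and tokens[i+1]), step i by 2 or 1
def mergeA_loop (tokens : List String) (i : Nat) : List String :=
  if i < tokens.length then
    if tokens.getD i "" = "#" ∧ i + 1 < tokens.length then
      (tokens.getD i "" ++ tokens.getD (i + 1) "") :: mergeA_loop tokens (i + 2)
    else
      tokens.getD i "" :: mergeA_loop tokens (i + 1)
  else []
termination_by tokens.length - i

def merge_hashtags_py (tokens : List String) : List String :=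
  mergeA_loop tokens 0

-- ===== PORT B =====
-- for token in tokens with a pending flag; flush a lone '#' at the end
def mergeB_go (tokens : List String) (pending : Bool) : List String :=
  match tokens with
  | [] => if pending then ["#"] else []
  | t :: rest =>
    if pending then ("#" ++ t) :: mergeB_go rest false
    else if t = "#" then mergeB_go rest true
    else t :: mergeB_go rest false

def merge_hashtags_py_alt (tokens : List String) : List String :=
  mergeB_go tokens false

-- ===== PRECONDITION & SPEC =====
def Spec_merge_hashtags_py (tokens : List String) (out : List String) : Prop := out = merge_hashtags_py_alt tokens
instance (tokens : List String) (out : List String) : Decidable (Spec_merge_hashtags_py tokens out) := by unfold Spec_merge_hashtags_py; infer_instance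

-- ===== CLAIM (what is proved, stated in full; the proofs are below) =====
def Claim_equal_merge_hashtags_py : Prop := ∀ (tokens : List String), Dom_merge_hashtags_py tokens → Spec_merge_hashtags_py tokens (merge_hashtags_py tokens)

-- ===== LEMMAS AND PROOFS =====

-- ===== VERDICT (by name: the statement is the Claim_ definition above) =====
lemma mergeA_eq_B (tokens : List String) (i : Nat) :
    mergeA_loop tokens i = mergeB_go (tokens.drop i) false := by
  by_cases h : i < tokens.length
  · have hd : tokens.drop i = tokens[i] :: tokens.drop (i + 1) :=
      List.drop_eq_getElem_cons h
    have hget : tokens.getD i "" = tokens[i] := List.getD_eq_getElem tokens _ h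
    by_cases hh : tokens[i] = "#"
    · by_cases h2 : i + 1 < tokens.length
      · have hd2 : tokens.drop (i + 1) = tokens[i+1] :: tokens.drop (i + 2) :=
          List.drop_eq_getElem_cons h2
        have hget2 : tokens.getD (i+1) "" = tokens[i+1] := List.getD_eq_getElem tokens _ h2
        rw [mergeA_loop, if_pos h, if_pos ⟨by rw [hget, hh], h2⟩, hd, hd2]
        rw [mergeA_eq_B tokens (i + 2), hget, hget2, hh]
        simp [mergeB_go]
      · have hd2 : tokens.drop (i + 1) = [] := by
          apply List.drop_eq_nil_of_le; omega
        rw [mergeA_loop, if_pos h, if_neg (by intro ⟨_, c⟩; exact h2 c), hd, hd2]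
        rw [mergeA_loop, if_neg (by omega), hget, hh]
        simp [mergeB_go]
    · rw [mergeA_loop, if_pos h, if_neg (by rw [hget]; intro ⟨c, _⟩; exact hh c), hd]
      rw [mergeA_eq_B tokens (i + 1), hget]
      simp [mergeB_go, hh]
  · have hd : tokens.drop i = [] := List.drop_eq_nil_of_le (by omega)
    rw [mergeA_loop, if_neg h, hd]
    simp [mergeB_go]
termination_by tokens.length - i

theorem merge_hashtags_py_spec : Claim_equal_merge_hashtags_py := by
  intro tokens _
  unfold Spec_merge_hashtags_py merge_hashtags_py merge_hashtags_py_alt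
  simpa using mergeA_eq_B tokens 0
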